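-- pv_equiv track=rewrite | github.com/dleemiller/CnakeCharmer | cnake_data/unpaired/interval_cluster_labels.py | cluster_by_intervals
-- ===== SOURCE A (Python) =====
-- def cluster_by_intervals(
--     starts: list[int], ends: list[int], ids: list[int], slack: int = 0
-- ) -> list[int]:
--     if not starts or len(starts) != len(ends) or len(starts) != len(ids):
--         return []
--     max_end = ends[0]
--     last_id = ids[0]
--     n_clusters = 1
--     out = [-1] * len(starts)
--     for i in range(len(starts)):
--         cur_id = ids[i]
--         if (starts[i] - slack) > max_end or cur_id != last_id:
--             n_clusters += 1
--             max_end = ends[i]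
--         else:
--             if ends[i] > max_end:
--                 max_end = ends[i]
--         out[i] = n_clusters
--         last_id = cur_id
--     return out
-- ===== SOURCE B (Python) =====
-- def cluster_by_intervals(
--     starts: list[int], ends: list[int], ids: list[int], slack: int = 0
-- ) -> list[int]:
--     if not starts or len(starts) != len(ends) or len(starts) != len(ids):
--         return []
--     n = len(starts)
--     out = []
--     label = 1
--     max_end = ends[0]
--     gid = ids[0]
--     i = 0
--     while i < n:
--         # open a (possibly new) cluster at i
--         if (starts[i] - slack) > max_end or ids[i] != gid:
--             label += 1
--             gid = ids[i]
--             max_end = ends[i]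
--         else:
--             max_end = max(max_end, ends[i])
--         # greedily absorb the whole run belonging to this cluster
--         j = i + 1
--         while j < n and ids[j] == gid and (starts[j] - slack) <= max_end:
--             max_end = max(max_end, ends[j])
--             j += 1
--         out.extend([label] * (j - i))
--         i = j
--     return out
-- ===== Notes on version B (the rewrite author's own statement) =====
-- stated objective: alternative
-- what changed: A sweeps element-by-element, incrementing a cluster counter inline and writing into a preallocated array; B is a run-based grouper: an outer loop opens a cluster, an inner loop greedily absorbs its whole run of members (exploiting that all ids in a cluster are equal), and the output is emitted a whole group at a time as [label]*(group size).
import Mathlib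
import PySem

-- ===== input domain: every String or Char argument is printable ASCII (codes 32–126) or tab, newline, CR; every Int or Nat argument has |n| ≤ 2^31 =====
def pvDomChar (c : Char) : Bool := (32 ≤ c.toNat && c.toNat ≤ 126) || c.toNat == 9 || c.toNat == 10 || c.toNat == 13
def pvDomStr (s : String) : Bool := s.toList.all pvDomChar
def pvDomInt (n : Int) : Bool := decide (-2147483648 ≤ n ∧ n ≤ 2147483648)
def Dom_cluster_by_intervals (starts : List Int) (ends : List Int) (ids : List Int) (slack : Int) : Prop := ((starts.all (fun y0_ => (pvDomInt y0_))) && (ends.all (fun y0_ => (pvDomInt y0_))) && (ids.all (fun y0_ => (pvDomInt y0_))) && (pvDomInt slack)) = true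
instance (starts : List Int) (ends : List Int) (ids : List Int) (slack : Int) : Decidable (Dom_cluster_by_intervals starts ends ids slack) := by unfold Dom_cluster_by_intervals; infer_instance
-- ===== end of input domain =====

-- B replaces A's element-by-element sweep by a run-based grouper (outer loop per
-- cluster, inner loop absorbing the cluster's run, output emitted a group at a time);
-- same O(n) cost, a different decomposition.

-- ===== PORT A =====
-- the body of A's for-loop: state (max_end, last_id, n_clusters, out), index i
def clusterStepA (starts ends ids : List Int) (slack : Int)
    (st : Int × Int × Int × List Int) (i : Int) : Int × Int × Int × List Int :=
  let cur_id := PySem.List.pyGetD ids i 0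
  if PySem.List.pyGetD starts i 0 - slack > st.1 ∨ cur_id ≠ st.2.1 then
    (PySem.List.pyGetD ends i 0, cur_id, st.2.2.1 + 1,
     PySem.List.pySetD st.2.2.2 i (st.2.2.1 + 1))
  else
    (if PySem.List.pyGetD ends i 0 > st.1 then PySem.List.pyGetD ends i 0 else st.1,
     cur_id, st.2.2.1, PySem.List.pySetD st.2.2.2 i st.2.2.1)

def cluster_by_intervals (starts : List Int) (ends : List Int) (ids : List Int) (slack : Int) : List Int :=
  if starts = [] ∨ starts.length ≠ ends.length ∨ starts.length ≠ ids.length then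
    []
  else
    let init : Int × Int × Int × List Int :=
      (PySem.List.pyGetD ends 0 0, PySem.List.pyGetD ids 0 0, 1,
       List.replicate starts.length (-1))
    let r := (PySem.List.pyRange 0 (starts.length : Int) 1).foldl
      (clusterStepA starts ends ids slack) init
    r.2.2.2

-- ===== PORT B =====
-- B's inner while loop: absorb the run of members of the open cluster (id = gid,
-- start within max_end+slack); returns (run length, final max_end, remaining triples)
def eatRun (slack gid : Int) : List (Int × Int × Int) → Int → Nat × Int × List (Int × Int × Int)
  | [], m => (0, m, [])
  | (s, e, c) :: rest, m =>
    if c == gid && decide (s - slack ≤ m) then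
      let r := eatRun slack gid rest (max m e)
      (r.1 + 1, r.2)
    else (0, m, (s, e, c) :: rest)

-- B's outer while loop: open a cluster at the head, absorb its run, emit the whole
-- group, continue on the rest; the fuel counter is the port of the loop bound
-- `i < n` (each iteration consumes at least one element, so trip.length fuel suffices)
def runsB (slack : Int) : Nat → List (Int × Int × Int) → Int → Int → Int → List Int
  | 0, _, _, _, _ => []
  | _ + 1, [], _, _, _ => []
  | f + 1, (s, e, c) :: rest, m, gid, label =>
    let st := if s - slack > m ∨ c ≠ gid then (label + 1, c, e) else (label, gid, max m e)
    let r := eatRun slack st.2.1 rest st.2.2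
    List.replicate (r.1 + 1) st.1 ++ runsB slack f r.2.2 r.2.1 st.2.1 st.1

def cluster_by_intervals_alt (starts : List Int) (ends : List Int) (ids : List Int) (slack : Int) : List Int :=
  if starts = [] ∨ starts.length ≠ ends.length ∨ starts.length ≠ ids.length then
    []
  else
    runsB slack starts.length (starts.zip (ends.zip ids))
      (PySem.List.pyGetD ends 0 0) (PySem.List.pyGetD ids 0 0) 1

-- ===== PRECONDITION & SPEC =====
def Spec_cluster_by_intervals (starts : List Int) (ends : List Int) (ids : List Int) (slack : Int) (out : List Int) : Prop := out = cluster_by_intervals_alt starts ends ids slack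
instance (starts : List Int) (ends : List Int) (ids : List Int) (slack : Int) (out : List Int) : Decidable (Spec_cluster_by_intervals starts ends ids slack out) := by unfold Spec_cluster_by_intervals; infer_instance

-- ===== CLAIM (what is proved, stated in full; the proofs are below) =====
def Claim_equal_cluster_by_intervals : Prop := ∀ (starts : List Int) (ends : List Int) (ids : List Int) (slack : Int), Dom_cluster_by_intervals starts ends ids slack → Spec_cluster_by_intervals starts ends ids slack (cluster_by_intervals starts ends ids slack)

-- ===== LEMMAS AND PROOFS =====

lemma eatRun_len (slack gid : Int) : ∀ (t : List (Int × Int × Int)) (m : Int),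
    (eatRun slack gid t m).2.2.length ≤ t.length := by
  intro t
  induction t with
  | nil => intro m; simp [eatRun]
  | cons x rest ih =>
    intro m
    rcases x with ⟨s, e, c⟩
    unfold eatRun
    split
    · exact le_trans (ih (max m e)) (Nat.le_succ _)
    · exact le_refl _

-- common specification of the per-element labels
def pvLabels (slack : Int) : List (Int × Int × Int) → Int → Int → Int → List Int
  | [], _, _, _ => []
  | (s, e, c) :: rest, m, l, n =>
    if s - slack > m ∨ c ≠ l then (n + 1) :: pvLabels slack rest e c (n + 1)
    else n :: pvLabels slack rest (if e > m then e else m) c n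

-- absorbing a run with eatRun matches repeatedly taking pvLabels' non-break branch
lemma eat_spec (slack gid label : Int) : ∀ (trip : List (Int × Int × Int)) (m : Int),
    pvLabels slack trip m gid label
      = List.replicate (eatRun slack gid trip m).1 label
        ++ pvLabels slack (eatRun slack gid trip m).2.2 (eatRun slack gid trip m).2.1 gid label := by
  intro trip
  induction trip with
  | nil => intro m; simp [eatRun]
  | cons x rest ih =>
    intro m
    rcases x with ⟨s, e, c⟩
    by_cases h : c = gid ∧ s - slack ≤ m
    · have hnb : ¬ (s - slack > m ∨ c ≠ gid) := by
        simp only [not_or, not_lt, not_ne_iff]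
        exact ⟨h.2, h.1⟩
      have hmax : (if e > m then e else m) = max m e := by
        simp only [max_def]; split_ifs <;> omega
      have hcond : (c == gid && decide (s - slack ≤ m)) = true := by
        simp [h.1, h.2]
      simp only [pvLabels, if_neg hnb, hmax]
      simp only [eatRun, if_pos hcond]
      rw [h.1, ih (max m e)]
      simp [List.replicate_succ]
    · have hc : ¬ (c == gid && decide (s - slack ≤ m)) = true := by
        simp only [Bool.and_eq_true, beq_iff_eq, decide_eq_true_eq]
        exact h
      simp only [eatRun, if_neg hc]
      simp

lemma runsB_eq_labels (slack : Int) : ∀ (n : Nat) (trip : List (Int × Int × Int)),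
    trip.length ≤ n → ∀ (m gid label : Int),
    runsB slack n trip m gid label = pvLabels slack trip m gid label := by
  intro n
  induction n with
  | zero =>
    intro trip h m gid label
    have : trip = [] := List.eq_nil_of_length_eq_zero (Nat.le_zero.mp h)
    subst this
    rw [runsB, pvLabels]
  | succ n ih =>
    intro trip h m gid label
    match trip with
    | [] => rw [runsB, pvLabels]
    | (s, e, c) :: rest =>
      have hlen : rest.length ≤ n := by simpa using Nat.lt_succ_iff.mp (by simpa using h)
      rw [runsB]
      by_cases hb : s - slack > m ∨ c ≠ gid
      · -- break branch: st = (label+1, c, e)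
        simp only [if_pos hb, pvLabels]
        rw [ih _ (le_trans (eatRun_len slack c rest e) hlen)]
        rw [eat_spec slack c (label + 1) rest e]
        simp [List.replicate_succ]
      · -- continue branch: st = (label, gid, max m e); here c = gid
        have hcg : c = gid := by
          rcases not_or.mp hb with ⟨_, h2⟩
          exact not_ne_iff.mp h2
        have hmax : (if e > m then e else m) = max m e := by
          simp only [max_def]; split_ifs <;> omega
        simp only [if_neg hb, pvLabels, hmax]
        rw [ih _ (le_trans (eatRun_len slack gid rest (max m e)) hlen)]
        rw [hcg, eat_spec slack gid label rest (max m e)]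
        simp [List.replicate_succ]

-- one step of A's loop body, evaluated at an in-range index
lemma stepA_eval (starts ends ids : List Int) (slack : Int) (k : Nat)
    (hkn : k < starts.length) (hke : k < ends.length) (hki : k < ids.length)
    (m l c : Int) (out : List Int) :
    clusterStepA starts ends ids slack (m, l, c, out) (k : Int)
      = if starts[k] - slack > m ∨ ids[k] ≠ l then
          (ends[k], ids[k], c + 1, out.set k (c + 1))
        else
          ((if ends[k] > m then ends[k] else m), ids[k], c, out.set k c) := by
  unfold clusterStepA
  simp only [PySem.List.pyGetD_natCast, PySem.List.pySetD_natCast,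
    List.getD_eq_getElem _ _ hkn, List.getD_eq_getElem _ _ hke,
    List.getD_eq_getElem _ _ hki]

lemma loopA_eq_labels (starts ends ids : List Int) (slack : Int)
    (hse : starts.length = ends.length) (hsi : starts.length = ids.length) :
    ∀ (d k : Nat), k + d = starts.length →
    ∀ (m l c : Int) (out : List Int), out.length = starts.length →
    ((PySem.List.pyRange (k : Int) (starts.length : Int) 1).foldl
        (clusterStepA starts ends ids slack) (m, l, c, out)).2.2.2
      = out.take k ++ pvLabels slack ((starts.zip (ends.zip ids)).drop k) m l c := by
  intro d
  induction d with
  | zero =>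
    intro k hk m l c out hout
    rw [PySem.List.pyRange_one_eq_nil (by exact_mod_cast (by omega : starts.length ≤ k))]
    have hdrop : (starts.zip (ends.zip ids)).drop k = [] := by
      apply List.drop_eq_nil_of_le
      simp only [List.length_zip, ← hse, ← hsi]
      omega
    simp [hdrop, pvLabels, List.take_of_length_le (by omega : out.length ≤ k)]
  | succ d ih =>
    intro k hk m l c out hout
    have hkn : k < starts.length := by omega
    have hke : k < ends.length := by omega
    have hki : k < ids.length := by omega
    have hkz : k < (starts.zip (ends.zip ids)).length := by
      simp only [List.length_zip, ← hse, ← hsi]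
      omega
    rw [PySem.List.pyRange_one_cons (by exact_mod_cast hkn)]
    rw [List.drop_eq_getElem_cons hkz]
    simp only [List.foldl_cons]
    have hcast : ((k : Int) + 1) = ((k + 1 : Nat) : Int) := by push_cast; ring
    have htrip : (starts.zip (ends.zip ids))[k] = (starts[k], ends[k], ids[k]) := by
      simp [List.getElem_zip]
    have hset : ∀ v : Int, (out.set k v).take (k + 1) = out.take k ++ [v] := by
      intro v
      have hko : k < out.length := by omega
      rw [List.take_add_one]
      simp [List.take_set, hko,
        List.set_eq_of_length_le (by simp : (List.take k out).length ≤ k)]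
    rw [stepA_eval starts ends ids slack k hkn hke hki m l c out]
    simp only [List.get_eq_getElem, htrip, pvLabels]
    by_cases hc : starts[k] - slack > m ∨ ids[k] ≠ l
    · rw [if_pos hc, if_pos hc]
      rw [hcast, ih (k + 1) (by omega) ends[k] ids[k] (c + 1) (out.set k (c + 1))
        (by simp [hout])]
      rw [hset]
      simp
    · rw [if_neg hc, if_neg hc]
      rw [hcast, ih (k + 1) (by omega) _ ids[k] c (out.set k c) (by simp [hout])]
      rw [hset]
      simp

-- ===== VERDICT (by name: the statement is the Claim_ definition above) =====
theorem cluster_by_intervals_spec : Claim_equal_cluster_by_intervals := by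
  intro starts ends ids slack _
  unfold Spec_cluster_by_intervals cluster_by_intervals cluster_by_intervals_alt
  by_cases hg : starts = [] ∨ starts.length ≠ ends.length ∨ starts.length ≠ ids.length
  · simp [hg]
  · rw [if_neg hg, if_neg hg]
    simp only [not_or, not_ne_iff] at hg
    have h0 := loopA_eq_labels starts ends ids slack hg.2.1 hg.2.2 starts.length 0
      (Nat.zero_add _)
      (PySem.List.pyGetD ends 0 0) (PySem.List.pyGetD ids 0 0) 1
      (List.replicate starts.length (-1)) (by simp)
    rw [runsB_eq_labels slack starts.length _ (by simp [hg.2.1])]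
    simpa using h0
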